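-- pv_equiv track=rewrite | github.com/mohammadalkhawaldah/NL_Swarm | D2_agent_new.py | build_snake_rows
-- ===== SOURCE A (Python) =====
-- def build_snake_rows(points):
--     rows = {}
--     for ix, iy, x, y in points:
--         rows.setdefault(iy, []).append((ix, iy, x, y))
--     ordered_rows = []
--     for idx, (_, row_cells) in enumerate(sorted(rows.items())):
--         row_cells.sort(key=lambda item: item[0], reverse=(idx % 2 == 1))
--         ordered_rows.append(row_cells)
--     return ordered_rows
-- ===== SOURCE B (Python) =====
-- def build_snake_rows(points):
--     remaining = list(points)
--     result = []
--     while remaining: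
--         lo = min(p[1] for p in remaining)
--         row = [p for p in remaining if p[1] == lo]
--         remaining = [p for p in remaining if p[1] != lo]
--         row.sort(key=lambda p: p[0], reverse=(len(result) % 2 == 1))
--         result.append(row)
--     return result
-- ===== Notes on version B (the rewrite author's own statement) =====
-- stated objective: alternative
-- what changed: B replaces A's dict-grouping plus sorted(items) with a selection loop: repeatedly extract the minimum remaining row index, filter out that row in original order, and sort it with alternating direction; no dict and no sort of the key list.
import Mathlib
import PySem

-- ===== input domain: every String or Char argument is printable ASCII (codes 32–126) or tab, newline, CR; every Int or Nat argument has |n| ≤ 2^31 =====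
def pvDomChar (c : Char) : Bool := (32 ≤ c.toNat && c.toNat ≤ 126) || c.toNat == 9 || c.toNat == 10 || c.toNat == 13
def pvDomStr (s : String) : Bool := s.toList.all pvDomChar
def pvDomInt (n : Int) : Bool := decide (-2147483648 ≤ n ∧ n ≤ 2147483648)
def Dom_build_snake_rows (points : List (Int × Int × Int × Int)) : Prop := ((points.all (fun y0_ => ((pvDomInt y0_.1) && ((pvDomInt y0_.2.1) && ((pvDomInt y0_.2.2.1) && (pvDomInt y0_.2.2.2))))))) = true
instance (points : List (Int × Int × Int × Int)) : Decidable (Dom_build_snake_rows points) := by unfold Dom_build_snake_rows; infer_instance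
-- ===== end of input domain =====

-- B replaces the dict-grouping + sorted(items) pipeline with a selection loop (extract the
-- minimum remaining row index each pass); same return value, different decomposition.

-- ===== PORT A =====
-- rows.setdefault(iy, []).append(cell) is exactly d.modify iy [] (· ++ [cell])
-- sorted(rows.items()): dict keys are distinct, so Python's tuple comparison never reaches
-- the list component; sorting by the first component is exact here.
def build_snake_rows (points : List (Int × Int × Int × Int)) : List (List (Int × Int × Int × Int)) :=
  let rows : PySem.Dict Int (List (Int × Int × Int × Int)) :=
    points.foldl (fun d p => d.modify p.2.1 [] (fun l => l ++ [p])) PySem.Dict.empty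
  (PySem.List.enumerate (PySem.List.sorted rows.items (fun q => q.1) false) 0).foldl
    (fun acc q => acc ++ [PySem.List.sorted q.2.2 (fun c => c.1) (PySem.Int.mod q.1 2 == 1)]) []

-- ===== PORT B =====
-- termination: the filtered list is strictly shorter because the element realizing the minimum is removed
theorem pvSnakeDec (remaining : List (Int × Int × Int × Int)) (lo : Int)
    (h : PySem.List.min? (remaining.map (fun p => p.2.1)) (fun x => x) = some lo) :
    (remaining.filter (fun p => !(p.2.1 == lo))).length < remaining.length := by
  have hm := PySem.List.min?_mem h
  rcases List.mem_map.mp hm with ⟨p, hp, hpk⟩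
  exact List.length_filter_lt_length_iff_exists.mpr ⟨p, hp, by simp [hpk]⟩

def snake_go (remaining : List (Int × Int × Int × Int)) (result : List (List (Int × Int × Int × Int))) :
    List (List (Int × Int × Int × Int)) :=
  match h : PySem.List.min? (remaining.map (fun p => p.2.1)) (fun x => x) with
  | none => result
  | some lo =>
      snake_go (remaining.filter (fun p => !(p.2.1 == lo)))
        (result ++ [PySem.List.sorted (remaining.filter (fun p => p.2.1 == lo))
                      (fun p => p.1) (result.length % 2 == 1)])
termination_by remaining.length
decreasing_by
  have hd := pvSnakeDec remaining lo h
  rw [← List.countP_eq_length_filter] at hd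
  rw [List.length_unattach, ← List.countP_eq_length_filter]
  have hc := List.countP_attach (l := remaining) (p := fun y => !(y.2.1 == lo))
  exact hc.trans_lt hd

def build_snake_rows_alt (points : List (Int × Int × Int × Int)) : List (List (Int × Int × Int × Int)) :=
  snake_go points []

-- ===== PRECONDITION & SPEC =====
def Spec_build_snake_rows (points : List (Int × Int × Int × Int)) (out : List (List (Int × Int × Int × Int))) : Prop := out = build_snake_rows_alt points
instance (points : List (Int × Int × Int × Int)) (out : List (List (Int × Int × Int × Int))) : Decidable (Spec_build_snake_rows points out) := by unfold Spec_build_snake_rows; infer_instance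

-- ===== CLAIM (what is proved, stated in full; the proofs are below) =====
def Claim_equal_build_snake_rows : Prop := ∀ (points : List (Int × Int × Int × Int)), Dom_build_snake_rows points → Spec_build_snake_rows points (build_snake_rows points)

-- ===== LEMMAS AND PROOFS =====

-- the common normal form: one row per key of ks, rows filtered from pts, snake direction from the index
def canonGo (pts : List (Int × Int × Int × Int)) : List Int → Nat → List (List (Int × Int × Int × Int))
  | [], _ => []
  | k :: t, i =>
      PySem.List.sorted (pts.filter (fun p => p.2.1 == k)) (fun c => c.1) (i % 2 == 1)
        :: canonGo pts t (i + 1)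

def sortedKeys (pts : List (Int × Int × Int × Int)) : List Int :=
  PySem.List.sorted (PySem.Set.ofList (pts.map (fun p => p.2.1))) (fun x => x) false

theorem keys_rows (points : List (Int × Int × Int × Int)) :
    (points.foldl (fun d p => d.modify p.2.1 [] (fun l => l ++ [p])) PySem.Dict.empty).keys
      = PySem.Set.ofList (points.map (fun p => p.2.1)) := by
  have h := PySem.Dict.keys_foldl_modify_key points (fun p => p.2.1) []
    (fun _ p => fun l => l ++ [p]) PySem.Dict.empty
  simpa [PySem.Set.update_nil_left] using h

theorem getD_rows (points : List (Int × Int × Int × Int)) (c : Int) :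
    (points.foldl (fun d p => d.modify p.2.1 [] (fun l => l ++ [p])) PySem.Dict.empty).getD c []
      = points.filter (fun p => p.2.1 == c) := by
  have hm := List.foldl_map (f := fun (p : Int × Int × Int × Int) => (p.2.1, p))
    (g := fun (d : PySem.Dict Int (List (Int × Int × Int × Int))) q => d.modify q.1 [] (fun l => l ++ [q.2]))
    (l := points) (init := PySem.Dict.empty)
  rw [← hm, PySem.Dict.getD_foldl_modify_append]
  simp [List.filter_map, List.map_map, Function.comp_def]

theorem sortedItems_rows (points : List (Int × Int × Int × Int)) :
    PySem.List.sorted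
        (points.foldl (fun d p => d.modify p.2.1 [] (fun l => l ++ [p])) PySem.Dict.empty).items
        (fun q => q.1) false
      = (sortedKeys points).map (fun k => (k, points.filter (fun p => p.2.1 == k))) := by
  have hk := keys_rows points
  have hnd : (points.foldl (fun d p => d.modify p.2.1 [] (fun l => l ++ [p])) PySem.Dict.empty).keys.Nodup := by
    rw [hk]; exact PySem.Set.nodup_ofList _
  rw [PySem.Dict.items_eq_map_keys _ hnd []]
  apply PySem.List.sorted_eq_of_perm_of_pairwise_lt
  · have hp : (sortedKeys points).Perm
        (points.foldl (fun d p => d.modify p.2.1 [] (fun l => l ++ [p])) PySem.Dict.empty).keys := by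
      rw [hk]; exact PySem.List.sorted_perm _ _ _
    have hpm := hp.map (fun k => (k, points.filter (fun p => p.2.1 == k)))
    refine hpm.trans (List.Perm.of_eq ?_)
    apply List.map_congr_left
    intro k hkmem
    simp [getD_rows]
  · have hpw := PySem.List.sorted_ofList_pairwise_lt (points.map (fun p => p.2.1))
    exact List.Pairwise.map _ (by intro a b hab; simpa using hab) hpw

theorem enumMap (pts : List (Int × Int × Int × Int)) (ks : List Int) (i : Nat) :
    (PySem.List.enumerate (ks.map (fun k => (k, pts.filter (fun p => p.2.1 == k)))) (i : Int)).map
        (fun q => PySem.List.sorted q.2.2 (fun c => c.1) (PySem.Int.mod q.1 2 == 1))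
      = canonGo pts ks i := by
  induction ks generalizing i with
  | nil => simp [canonGo]
  | cons k t ih =>
      have hcast : ((i : Int) + 1) = ((i + 1 : Nat) : Int) := by push_cast; ring
      have hmod : (PySem.Int.mod (i : Int) 2 == 1) = ((i % 2 == 1 : Bool)) := by
        have h2 : PySem.Int.mod (i : Int) 2 = ((i % 2 : Nat) : Int) := by
          exact_mod_cast PySem.Int.mod_natCast i 2
        rw [h2]
        rcases Nat.mod_two_eq_zero_or_one i with h | h <;> rw [h] <;> decide
      rw [List.map_cons, PySem.List.enumerate_cons, List.map_cons, hcast, ih]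
      simp only [canonGo, hmod]

theorem a_eq_canon (points : List (Int × Int × Int × Int)) :
    build_snake_rows points = canonGo points (sortedKeys points) 0 := by
  show (PySem.List.enumerate (PySem.List.sorted
      (points.foldl (fun d p => d.modify p.2.1 [] (fun l => l ++ [p])) PySem.Dict.empty).items
      (fun q => q.1) false) 0).foldl
      (fun acc q => acc ++ [PySem.List.sorted q.2.2 (fun c => c.1) (PySem.Int.mod q.1 2 == 1)]) []
    = canonGo points (sortedKeys points) 0
  rw [PySem.List.foldl_append_singleton_eq_map, List.nil_append, sortedItems_rows]
  have h := enumMap points (sortedKeys points) 0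
  simpa using h

theorem canonGo_filter (pts : List (Int × Int × Int × Int)) (k : Int) (t : List Int) (i : Nat)
    (ht : ∀ x ∈ t, x ≠ k) :
    canonGo (pts.filter (fun p => !(p.2.1 == k))) t i = canonGo pts t i := by
  induction t generalizing i with
  | nil => rfl
  | cons x t ih =>
      have hx : x ≠ k := ht x List.mem_cons_self
      simp only [canonGo]
      congr 1
      · congr 1
        rw [List.filter_filter]
        apply List.filter_congr
        intro p _
        by_cases hp : p.2.1 = x <;> simp [hp, hx]
      · exact ih (i + 1) (fun y hy => ht y (List.mem_cons_of_mem _ hy))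

theorem sortedKeys_filter (pts : List (Int × Int × Int × Int)) (k : Int) (t : List Int)
    (hk : sortedKeys pts = k :: t) :
    sortedKeys (pts.filter (fun p => !(p.2.1 == k))) = t := by
  have hpw := PySem.List.sorted_ofList_pairwise_lt (pts.map (fun p => p.2.1))
  have hk' : PySem.List.sorted (PySem.Set.ofList (pts.map (fun p => p.2.1))) (fun x => x) false = k :: t := hk
  rw [hk'] at hpw
  have hlt : ∀ x ∈ t, k < x := (List.pairwise_cons.mp hpw).1
  have htpw : t.Pairwise (· < ·) := (List.pairwise_cons.mp hpw).2
  have htnd : t.Nodup := htpw.imp ne_of_lt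
  apply PySem.List.sorted_eq_of_perm_of_pairwise_lt
  · rw [List.perm_ext_iff_of_nodup htnd (PySem.Set.nodup_ofList _)]
    intro a
    have hmemK : a ∈ (k :: t) ↔ a ∈ pts.map (fun p => p.2.1) := by
      rw [← hk, sortedKeys, PySem.List.mem_sorted]
      exact PySem.Set.mem_ofList _ _
    constructor
    · intro hat
      have hank : a ≠ k := fun hak => absurd (hak ▸ hlt a hat) (lt_irrefl k)
      have : a ∈ pts.map (fun p => p.2.1) := hmemK.mp (List.mem_cons_of_mem _ hat)
      rcases List.mem_map.mp this with ⟨p, hp, hpa⟩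
      rw [PySem.Set.mem_ofList]
      exact List.mem_map.mpr ⟨p, List.mem_filter.mpr ⟨hp, by simp [hpa, hank]⟩, hpa⟩
    · intro ha
      rw [PySem.Set.mem_ofList] at ha
      rcases List.mem_map.mp ha with ⟨p, hp, hpa⟩
      have hpf := List.mem_filter.mp hp
      have hank : a ≠ k := by
        have := hpf.2
        simp only [Bool.not_eq_eq_eq_not, Bool.not_true, beq_eq_false_iff_ne] at this
        exact hpa ▸ this
      have : a ∈ (k :: t) := hmemK.mpr (List.mem_map.mpr ⟨p, hpf.1, hpa⟩)
      rcases List.mem_cons.mp this with h | h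
      · exact absurd h hank
      · exact h
  · exact htpw

theorem b_eq_canon (pts : List (Int × Int × Int × Int)) (acc : List (List (Int × Int × Int × Int))) :
    snake_go pts acc = acc ++ canonGo pts (sortedKeys pts) acc.length := by
  suffices H : ∀ (n : Nat) (pts : List (Int × Int × Int × Int)) (acc : List (List (Int × Int × Int × Int))),
      pts.length ≤ n → snake_go pts acc = acc ++ canonGo pts (sortedKeys pts) acc.length from
    H pts.length pts acc le_rfl
  intro n
  induction n with
  | zero =>
      intro pts acc hL
      have hnil : pts = [] := List.length_eq_zero_iff.mp (Nat.le_zero.mp hL)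
      subst hnil
      rw [snake_go]
      simp [canonGo, sortedKeys, PySem.Set.ofList, PySem.List.sorted, PySem.List.min?]
  | succ n ih =>
      intro pts acc hL
      rw [snake_go]
      split
      next h =>
          have hnil : pts = [] := List.map_eq_nil_iff.mp ((PySem.List.min?_eq_none_iff _ _).mp h)
          subst hnil
          simp [canonGo, sortedKeys, PySem.Set.ofList, PySem.List.sorted]
      next lo h =>
          cases hK : sortedKeys pts with
          | nil =>
              exfalso
              have hmem := PySem.List.min?_mem h
              have hs : lo ∈ PySem.Set.ofList (pts.map (fun p => p.2.1)) :=
                (PySem.Set.mem_ofList _ _).mpr hmem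
              rw [← PySem.List.mem_sorted _ (fun x => x) false] at hs
              have hK' : PySem.List.sorted (PySem.Set.ofList (pts.map (fun p => p.2.1))) (fun x => x) false = [] := hK
              rw [hK'] at hs
              exact List.not_mem_nil hs
          | cons k t =>
              have hklo : k = lo := by
                have h1 := PySem.List.key_head_sorted_le _ (fun x => x) hK
                have hlomem : lo ∈ pts.map (fun p => p.2.1) := PySem.List.min?_mem h
                have hk_le_lo : k ≤ lo := h1 lo ((PySem.Set.mem_ofList _ _).mpr hlomem)
                have hkmem : k ∈ pts.map (fun p => p.2.1) := by
                  have hkk : k ∈ sortedKeys pts := by rw [hK]; exact List.mem_cons_self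
                  rw [sortedKeys, PySem.List.mem_sorted] at hkk
                  exact (PySem.Set.mem_ofList _ _).mp hkk
                exact le_antisymm hk_le_lo (PySem.List.min?_isMin h k hkmem)
              subst hklo
              have hdec := pvSnakeDec pts k h
              have hlen : (pts.filter (fun p => !(p.2.1 == k))).length ≤ n := by omega
              rw [ih _ _ hlen, sortedKeys_filter pts k t hK]
              have hlt : ∀ x ∈ t, k < x := by
                have hpw := PySem.List.sorted_ofList_pairwise_lt (pts.map (fun p => p.2.1))
                have hK' : PySem.List.sorted (PySem.Set.ofList (pts.map (fun p => p.2.1))) (fun x => x) false = k :: t := hK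
                rw [hK'] at hpw
                exact (List.pairwise_cons.mp hpw).1
              rw [canonGo_filter pts k t _ (fun x hx => (hlt x hx).ne')]
              simp [canonGo]

-- ===== VERDICT (by name: the statement is the Claim_ definition above) =====
theorem build_snake_rows_spec : Claim_equal_build_snake_rows := by
  intro points _
  show build_snake_rows points = build_snake_rows_alt points
  rw [a_eq_canon, build_snake_rows_alt, b_eq_canon]
  rfl
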